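-- pv_equiv track=rewrite | github.com/darthcode66/jarvis | src/fam_scraper.py | _agrupar_grade
-- ===== SOURCE A (Python) =====
-- HORARIOS = {
--     "P1": ("", ""),          # horário variável (sábado / ativ. complementar)
--     "01": ("19:00", "19:50"),
--     "02": ("19:50", "20:40"),
--     "03": ("20:50", "21:40"),
--     "04": ("21:40", "22:30"),
-- }
--
-- def _agrupar_grade(grade_crua: dict) -> dict:
--     """Agrupa slots por matéria e calcula início/fim de cada bloco.
--
--     Lida com múltiplas matérias no mesmo slot (ex: Extensão + Tópicos na aula 03-04).
--     """
--     ordem_aulas = ["P1", "01", "02", "03", "04"]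
--
--     resultado = {}
--     for dia, slots in grade_crua.items():
--         if not slots:
--             resultado[dia] = []
--             continue
--
--         # Agrupa por matéria: {materia: (prof, [aula_labels])}
--         materias = {}
--         for aula_label, materia, prof in slots:
--             if materia not in materias:
--                 materias[materia] = (prof, [])
--             if aula_label not in materias[materia][1]:
--                 materias[materia][1].append(aula_label)
--
--         # Cria blocos com início/fim baseado na primeira e última aula
--         blocos = []
--         for materia, (prof, aulas) in materias.items():
--             aulas.sort(key=lambda a: ordem_aulas.index(a) if a in ordem_aulas else 99)
--             inicio = HORARIOS.get(aulas[0], ("", ""))[0]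
--             fim = HORARIOS.get(aulas[-1], ("", ""))[1]
--             blocos.append({"materia": materia, "prof": prof, "inicio": inicio, "fim": fim})
--
--         # Ordena por horário de início
--         blocos.sort(key=lambda b: b["inicio"])
--         resultado[dia] = blocos
--
--     return resultado
-- ===== SOURCE B (Python) =====
-- HORARIOS = {
--     "P1": ("", ""),          # horário variável (sábado / ativ. complementar)
--     "01": ("19:00", "19:50"),
--     "02": ("19:50", "20:40"),
--     "03": ("20:50", "21:40"),
--     "04": ("21:40", "22:30"),
-- }
--
-- def _agrupar_grade(grade_crua: dict) -> dict:
--     """Single pass per day: keeps only each subject's min/max-rank label (no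
--     per-subject label list, no dedup, no per-subject sort)."""
--     ordem = {lbl: i for i, lbl in enumerate(["P1", "01", "02", "03", "04"])}
--     resultado = {}
--     for dia, slots in grade_crua.items():
--         extremos = {}  # materia -> [prof, lo_label, lo_rank, hi_label, hi_rank]
--         for aula_label, materia, prof in slots:
--             r = ordem.get(aula_label, 99)
--             e = extremos.get(materia)
--             if e is None:
--                 extremos[materia] = [prof, aula_label, r, aula_label, r]
--             else:
--                 if r < e[2]:
--                     e[1], e[2] = aula_label, r
--                 if r > e[4]:
--                     e[3], e[4] = aula_label, r
--         blocos = [{"materia": m, "prof": p,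
--                    "inicio": HORARIOS.get(lo, ("", ""))[0],
--                    "fim": HORARIOS.get(hi, ("", ""))[1]}
--                   for m, (p, lo, _rl, hi, _rh) in extremos.items()]
--         blocos.sort(key=lambda b: b["inicio"])
--         resultado[dia] = blocos
--     return resultado
-- ===== Notes on version B (the rewrite author's own statement) =====
-- stated objective: alternative
-- what changed: Per subject, A collects a deduplicated label list, sorts it by rank and reads its first/last element; B keeps only a running (min-rank, max-rank) label pair updated in a single pass over the slots, so the per-subject list, dedup membership test and sort disappear.
import Mathlib
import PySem

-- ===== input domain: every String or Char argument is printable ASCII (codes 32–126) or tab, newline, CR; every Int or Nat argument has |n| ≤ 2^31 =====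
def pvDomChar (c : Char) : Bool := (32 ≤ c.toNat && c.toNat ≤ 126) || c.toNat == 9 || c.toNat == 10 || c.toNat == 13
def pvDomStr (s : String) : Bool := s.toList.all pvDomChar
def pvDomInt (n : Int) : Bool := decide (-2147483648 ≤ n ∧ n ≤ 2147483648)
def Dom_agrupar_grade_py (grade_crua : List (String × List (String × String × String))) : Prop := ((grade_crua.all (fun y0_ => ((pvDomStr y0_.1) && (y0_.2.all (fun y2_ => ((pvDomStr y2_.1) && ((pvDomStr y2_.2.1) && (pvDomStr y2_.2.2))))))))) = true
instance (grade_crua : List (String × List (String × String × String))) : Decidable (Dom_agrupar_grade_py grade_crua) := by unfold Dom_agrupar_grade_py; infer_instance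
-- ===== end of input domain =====

-- B replaces A's per-subject label list + dedup + per-subject sort with a single
-- running min/max-rank scan per subject (objective: alternative algorithm).


-- ===== PORT A =====

-- module constant HORARIOS (a dict literal)
def pvHorarios : PySem.Dict String (String × String) :=
  PySem.Dict.mk [("P1", ("", "")), ("01", ("19:00", "19:50")), ("02", ("19:50", "20:40")),
                 ("03", ("20:50", "21:40")), ("04", ("21:40", "22:30"))]

def pvOrdemAulas : List String := ["P1", "01", "02", "03", "04"]

-- sort key: ordem_aulas.index(a) if a in ordem_aulas else 99
def pvRankA (a : String) : Int :=
  if pvOrdemAulas.contains a then (((PySem.List.index? pvOrdemAulas a).getD 0 : Nat) : Int) else 99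

-- one iteration of A's outer loop body for a non-empty slots list
-- (aulas[0] / aulas[-1] ported with pyGetD: the list is provably non-empty, so
-- pyGetD agrees with Python's indexing here)
def pvDayA (slots : List (String × String × String)) : List (List (String × String)) :=
  let materias := slots.foldl (fun d s =>
      let d1 := if d.contains s.2.1 then d else d.insert s.2.1 (s.2.2, ([] : List String))
      let pr := d1.getD s.2.1 ("", [])
      if s.1 ∈ pr.2 then d1 else d1.insert s.2.1 (pr.1, pr.2 ++ [s.1]))
    (PySem.Dict.empty : PySem.Dict String (String × List String))
  let blocos := materias.items.foldl (fun bl it =>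
      let aulas := PySem.List.sorted it.2.2 pvRankA false
      let inicio := (pvHorarios.getD (PySem.List.pyGetD aulas 0 "") ("", "")).1
      let fim := (pvHorarios.getD (PySem.List.pyGetD aulas (-1) "") ("", "")).2
      bl ++ [[("materia", it.1), ("prof", it.2.1), ("inicio", inicio), ("fim", fim)]]) []
  PySem.List.sorted blocos (fun b => (PySem.Dict.mk b).getD "inicio" "") false

def agrupar_grade_py (grade_crua : List (String × List (String × String × String))) : List (String × List (List (String × String))) :=
  (grade_crua.foldl (fun res p =>
      if p.2 = [] then res.insert p.1 [] else res.insert p.1 (pvDayA p.2))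
    (PySem.Dict.empty : PySem.Dict String (List (List (String × String))))).items

-- ===== PORT B =====

-- ordem = {lbl: i for i, lbl in enumerate(["P1","01","02","03","04"])}
def pvOrdemDict : PySem.Dict String Int :=
  PySem.Dict.mk [("P1", 0), ("01", 1), ("02", 2), ("03", 3), ("04", 4)]

def pvRankB (lbl : String) : Int := pvOrdemDict.getD lbl 99

-- one iteration of B's outer loop body
def pvDayB (slots : List (String × String × String)) : List (List (String × String)) :=
  let extremos := slots.foldl (fun d s =>
      let r := pvRankB s.1
      match d.get? s.2.1 with
      | none => d.insert s.2.1 (s.2.2, s.1, r, s.1, r)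
      | some e =>
          let e1 := if r < e.2.2.1 then (e.1, s.1, r, e.2.2.2) else e
          let e2 := if e1.2.2.2.2 < r then (e1.1, e1.2.1, e1.2.2.1, s.1, r) else e1
          d.insert s.2.1 e2)
    (PySem.Dict.empty : PySem.Dict String (String × String × Int × String × Int))
  let blocos := extremos.items.map (fun it =>
      [("materia", it.1), ("prof", it.2.1),
       ("inicio", (pvHorarios.getD it.2.2.1 ("", "")).1),
       ("fim", (pvHorarios.getD it.2.2.2.2.1 ("", "")).2)])
  PySem.List.sorted blocos (fun b => (PySem.Dict.mk b).getD "inicio" "") false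

def agrupar_grade_py_alt (grade_crua : List (String × List (String × String × String))) : List (String × List (List (String × String))) :=
  (grade_crua.foldl (fun res p => res.insert p.1 (pvDayB p.2))
    (PySem.Dict.empty : PySem.Dict String (List (List (String × String))))).items

-- ===== PRECONDITION & SPEC =====
def Spec_agrupar_grade_py (grade_crua : List (String × List (String × String × String))) (out : List (String × List (List (String × String)))) : Prop := out = agrupar_grade_py_alt grade_crua
instance (grade_crua : List (String × List (String × String × String))) (out : List (String × List (List (String × String)))) : Decidable (Spec_agrupar_grade_py grade_crua out) := by unfold Spec_agrupar_grade_py; infer_instance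

-- ===== CLAIM (what is proved, stated in full; the proofs are below) =====
def Claim_equal_agrupar_grade_py : Prop := ∀ (grade_crua : List (String × List (String × String × String))), Dom_agrupar_grade_py grade_crua → Spec_agrupar_grade_py grade_crua (agrupar_grade_py grade_crua)

-- ===== LEMMAS AND PROOFS =====

theorem pvRank_eq (a : String) : pvRankA a = pvRankB a := by
  by_cases h1 : a = "P1"; · subst h1; decide
  by_cases h2 : a = "01"; · subst h2; decide
  by_cases h3 : a = "02"; · subst h3; decide
  by_cases h4 : a = "03"; · subst h4; decide
  by_cases h5 : a = "04"; · subst h5; decide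
  have e1 : ("P1" == a) = false := by simp [Ne.symm h1]
  have e2 : ("01" == a) = false := by simp [Ne.symm h2]
  have e3 : ("02" == a) = false := by simp [Ne.symm h3]
  have e4 : ("03" == a) = false := by simp [Ne.symm h4]
  have e5 : ("04" == a) = false := by simp [Ne.symm h5]
  simp [pvRankA, pvRankB, pvOrdemDict, pvOrdemAulas, PySem.Dict.getD, PySem.Dict.get?,
        List.find?, h1, h2, h3, h4, h5, e1, e2, e3, e4, e5]

-- classification of pvRankB's value together with the HORARIOS lookup
theorem pvRankB_spec (a : String) :
    (a = "P1" ∧ pvRankB a = 0) ∨ (a = "01" ∧ pvRankB a = 1) ∨ (a = "02" ∧ pvRankB a = 2) ∨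
    (a = "03" ∧ pvRankB a = 3) ∨ (a = "04" ∧ pvRankB a = 4) ∨
    (pvRankB a = 99 ∧ pvHorarios.get? a = none) := by
  by_cases h1 : a = "P1"; · exact Or.inl ⟨h1, by subst h1; decide⟩
  by_cases h2 : a = "01"; · exact Or.inr (Or.inl ⟨h2, by subst h2; decide⟩)
  by_cases h3 : a = "02"; · exact Or.inr (Or.inr (Or.inl ⟨h3, by subst h3; decide⟩))
  by_cases h4 : a = "03"; · exact Or.inr (Or.inr (Or.inr (Or.inl ⟨h4, by subst h4; decide⟩)))
  by_cases h5 : a = "04"; · exact Or.inr (Or.inr (Or.inr (Or.inr (Or.inl ⟨h5, by subst h5; decide⟩))))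
  have e1 : ("P1" == a) = false := by simp [Ne.symm h1]
  have e2 : ("01" == a) = false := by simp [Ne.symm h2]
  have e3 : ("02" == a) = false := by simp [Ne.symm h3]
  have e4 : ("03" == a) = false := by simp [Ne.symm h4]
  have e5 : ("04" == a) = false := by simp [Ne.symm h5]
  refine Or.inr (Or.inr (Or.inr (Or.inr (Or.inr ⟨?_, ?_⟩))))
  · simp [pvRankB, pvOrdemDict, PySem.Dict.getD, PySem.Dict.get?, List.find?, e1, e2, e3, e4, e5]
  · simp [pvHorarios, PySem.Dict.get?, List.find?, e1, e2, e3, e4, e5]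

theorem pvHorSnd_eq_of_rank_eq {a b : String} (h : pvRankB a = pvRankB b) :
    (pvHorarios.getD a ("", "")).2 = (pvHorarios.getD b ("", "")).2 := by
  rcases pvRankB_spec a with ⟨ea, ra⟩ | ⟨ea, ra⟩ | ⟨ea, ra⟩ | ⟨ea, ra⟩ | ⟨ea, ra⟩ | ⟨ra, ga⟩ <;>
    rcases pvRankB_spec b with ⟨eb, rb⟩ | ⟨eb, rb⟩ | ⟨eb, rb⟩ | ⟨eb, rb⟩ | ⟨eb, rb⟩ | ⟨rb, gb⟩ <;>
    first
      | (subst ea; subst eb; rfl)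
      | (exfalso; omega)
      | (simp [PySem.Dict.getD, ga, gb])


-- ---- B's running-extremes scan, as a function of A's per-subject label list ----

-- one update of B's extremes record (prof, lo, rlo, hi, rhi) by a label
def pvStepE (e : String × String × Int × String × Int) (lbl : String) :
    String × String × Int × String × Int :=
  let r := pvRankB lbl
  let e1 := if r < e.2.2.1 then (e.1, lbl, r, e.2.2.2) else e
  if e1.2.2.2.2 < r then (e1.1, e1.2.1, e1.2.2.1, lbl, r) else e1

-- extremes of a whole label list (dummy value on [])
def pvExt (p : String) : List String → String × String × Int × String × Int
  | [] => (p, "", 0, "", 0)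
  | l :: t => t.foldl pvStepE (p, l, pvRankB l, l, pvRankB l)

theorem pvExt_append (p x : String) (L : List String) (hL : L ≠ []) :
    pvExt p (L ++ [x]) = pvStepE (pvExt p L) x := by
  cases L with
  | nil => exact absurd rfl hL
  | cons l t => simp [pvExt, List.foldl_append]

-- ---- insertion-sort facts ----

theorem pvInsertBy_ne_nil (bf : String → String → Bool) (x : String) (ys : List String) :
    PySem.List.insertBy bf x ys ≠ [] := by
  cases ys with
  | nil => simp [PySem.List.insertBy]
  | cons y ys => simp only [PySem.List.insertBy]; split <;> simp

theorem pvHeadD_insertBy (bf : String → String → Bool) (x y d : String) (ys : List String) :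
    (PySem.List.insertBy bf x (y :: ys)).headD d = if bf x y then x else y := by
  simp only [PySem.List.insertBy]; split <;> simp

theorem pvGetLast?_insertBy (bf : String → String → Bool) (x : String) (ys : List String) :
    (PySem.List.insertBy bf x ys).getLast? = if ys.any (bf x) then ys.getLast? else some x := by
  induction ys with
  | nil => simp [PySem.List.insertBy]
  | cons y ys ih =>
    simp only [PySem.List.insertBy]
    by_cases h : bf x y = true
    · simp [h]
    · cases ys with
      | nil => simp [PySem.List.insertBy, h]
      | cons c cs =>
        obtain ⟨z, zs, hz⟩ : ∃ z zs, PySem.List.insertBy bf x (c :: cs) = z :: zs := by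
          rcases h' : PySem.List.insertBy bf x (c :: cs) with _ | ⟨z, zs⟩
          · exact absurd h' (pvInsertBy_ne_nil bf x (c :: cs))
          · exact ⟨z, zs, rfl⟩
        simp only [h, Bool.false_eq_true, if_false, hz, List.getLast?_cons_cons]
        rw [← hz, ih]
        simp [h]

theorem pvSorted_append (L : List String) (x : String) :
    PySem.List.sorted (L ++ [x]) pvRankB false =
      PySem.List.insertBy (fun a b => decide (pvRankB a < pvRankB b)) x
        (PySem.List.sorted L pvRankB false) := by
  simp [PySem.List.sorted, List.foldl_append]


-- ---- the inductive package: B's scan vs the head/last of A's sorted list ----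

theorem pvPack (p : String) (L : List String) (h : L ≠ []) :
    (pvExt p L).1 = p ∧
    (pvExt p L).2.2.1 = pvRankB (pvExt p L).2.1 ∧
    (pvExt p L).2.2.2.2 = pvRankB (pvExt p L).2.2.2.1 ∧
    (pvExt p L).2.2.2.1 ∈ L ∧
    (∀ y ∈ L, (pvExt p L).2.2.1 ≤ pvRankB y ∧ pvRankB y ≤ (pvExt p L).2.2.2.2) ∧
    (PySem.List.sorted L pvRankB false).headD "" = (pvExt p L).2.1 ∧
    pvRankB ((PySem.List.sorted L pvRankB false).getLastD "") = (pvExt p L).2.2.2.2 := by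
  induction L using List.reverseRecOn with
  | nil => exact absurd rfl h
  | append_singleton L x ih =>
    rcases eq_or_ne L [] with rfl | hL
    · refine ⟨rfl, rfl, rfl, by simp [pvExt], ?_, ?_, ?_⟩
      · intro y hy; simp at hy; subst hy; simp [pvExt]
      · simp [pvExt, PySem.List.sorted, PySem.List.insertBy]
      · simp [pvExt, PySem.List.sorted, PySem.List.insertBy]
    · obtain ⟨c1, c2, c3, c4, c5, c6, c7⟩ := ih hL
      set e := pvExt p L with he
      have hs : PySem.List.sorted L pvRankB false ≠ [] := by
        simpa [PySem.List.sorted_eq_nil_iff] using hL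
      obtain ⟨m, t, hmt⟩ : ∃ m t, PySem.List.sorted L pvRankB false = m :: t := by
        rcases h' : PySem.List.sorted L pvRankB false with _ | ⟨m, t⟩
        · exact absurd h' hs
        · exact ⟨m, t, rfl⟩
      rw [hmt] at c6
      simp only [List.headD_cons] at c6
      have hrhi : pvRankB e.2.2.2.1 = e.2.2.2.2 := c3.symm
      have hrl : e.2.2.1 ≤ e.2.2.2.2 := by
        have h5 := (c5 e.2.2.2.1 c4).1
        omega
      have hanyIff :
          ((PySem.List.sorted L pvRankB false).any
            (fun y => decide (pvRankB x < pvRankB y)) = true) ↔ pvRankB x < e.2.2.2.2 := by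
        constructor
        · intro hA
          obtain ⟨y, hy, hlt⟩ := List.any_eq_true.mp hA
          have hyL : y ∈ L := by
            have := (PySem.List.mem_sorted (xs := L) (key := pvRankB) (rev := false) (x := y)).mp hy
            exact this
          have := (c5 y hyL).2
          simp at hlt
          omega
        · intro hlt
          refine List.any_eq_true.mpr ⟨e.2.2.2.1, ?_, by simp; omega⟩
          exact (PySem.List.mem_sorted (xs := L) (key := pvRankB) (rev := false)
            (x := e.2.2.2.1)).mpr c4
      have hstep : pvStepE e x =
          if pvRankB x < e.2.2.1 then (e.1, x, pvRankB x, e.2.2.2)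
          else if e.2.2.2.2 < pvRankB x then (e.1, e.2.1, e.2.2.1, x, pvRankB x) else e := by
        by_cases hlt : pvRankB x < e.2.2.1 <;> by_cases hgt : e.2.2.2.2 < pvRankB x
        · exact absurd hgt (by omega)
        · simp [pvStepE, hlt, hgt]
        · simp [pvStepE, hlt, hgt]
        · simp [pvStepE, hlt, hgt]
      rw [pvExt_append p x L hL, ← he, hstep]
      rw [pvSorted_append]
      have hheadD : ∀ d : String,
          (PySem.List.insertBy (fun a b => decide (pvRankB a < pvRankB b)) x
            (PySem.List.sorted L pvRankB false)).headD d
          = if pvRankB x < e.2.2.1 then x else e.2.1 := by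
        intro d
        rw [hmt, pvHeadD_insertBy, c6, ← c2]
        simp
      have hlastR :
          pvRankB ((PySem.List.insertBy (fun a b => decide (pvRankB a < pvRankB b)) x
            (PySem.List.sorted L pvRankB false)).getLastD "")
          = if pvRankB x ≤ e.2.2.2.2 then e.2.2.2.2 else pvRankB x := by
        rw [List.getLastD_eq_getLast?, pvGetLast?_insertBy]
        by_cases hc : pvRankB x < e.2.2.2.2
        · rw [if_pos (hanyIff.mpr hc), if_pos (by omega)]
          rw [← List.getLastD_eq_getLast?, c7]
        · rw [if_neg (fun hA => hc (hanyIff.mp hA))]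
          simp only [Option.getD_some]
          by_cases hq : pvRankB x ≤ e.2.2.2.2
          · rw [if_pos hq]; omega
          · rw [if_neg hq]
      by_cases hlt : pvRankB x < e.2.2.1
      · refine ⟨?_, ?_, ?_, ?_, ?_, ?_, ?_⟩
        · simp only [if_pos hlt]; exact c1
        · simp only [if_pos hlt]
        · simp only [if_pos hlt]; exact c3
        · simp only [if_pos hlt]; exact List.mem_append_left _ c4
        · intro y hy
          simp only [if_pos hlt]
          rcases List.mem_append.mp hy with hyL | hyx
          · have := c5 y hyL; constructor <;> omega
          · simp at hyx; subst hyx; constructor <;> omega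
        · rw [hheadD]; simp [hlt]
        · rw [hlastR]; simp only [if_pos hlt]
          rw [if_pos (by omega)]
      · by_cases hgt : e.2.2.2.2 < pvRankB x
        · refine ⟨?_, ?_, ?_, ?_, ?_, ?_, ?_⟩
          · simp only [if_neg hlt, if_pos hgt]; exact c1
          · simp only [if_neg hlt, if_pos hgt]; exact c2
          · simp only [if_neg hlt, if_pos hgt]
          · simp only [if_neg hlt, if_pos hgt]; exact List.mem_append_right _ (by simp)
          · intro y hy
            simp only [if_neg hlt, if_pos hgt]
            rcases List.mem_append.mp hy with hyL | hyx
            · have := c5 y hyL; constructor <;> omega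
            · simp at hyx; subst hyx; constructor <;> omega
          · rw [hheadD]; simp [hlt, hgt]
          · rw [hlastR]; simp only [if_neg hlt, if_pos hgt]
            rw [if_neg (by omega)]
        · refine ⟨?_, ?_, ?_, ?_, ?_, ?_, ?_⟩
          · simp only [if_neg hlt, if_neg hgt]; exact c1
          · simp only [if_neg hlt, if_neg hgt]; exact c2
          · simp only [if_neg hlt, if_neg hgt]; exact c3
          · simp only [if_neg hlt, if_neg hgt]; exact List.mem_append_left _ c4
          · intro y hy
            simp only [if_neg hlt, if_neg hgt]
            rcases List.mem_append.mp hy with hyL | hyx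
            · have := c5 y hyL; constructor <;> omega
            · simp at hyx; subst hyx; constructor <;> omega
          · rw [hheadD]; simp [hlt, hgt]
          · rw [hlastR]; simp only [if_neg hlt, if_neg hgt]
            rw [if_pos (by omega)]


-- ---- relating the two per-day dictionaries ----

def pvF (it : String × String × List String) : String × String × String × Int × String × Int :=
  (it.1, pvExt it.2.1 it.2.2)

def pvMap (d : PySem.Dict String (String × List String)) :
    PySem.Dict String (String × String × Int × String × Int) :=
  PySem.Dict.mk (d.items.map pvF)

def pvGood (d : PySem.Dict String (String × List String)) : Prop :=
  d.keys.Nodup ∧ ∀ it ∈ d.items, it.2.2 ≠ []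

theorem pvMap_contains (d : PySem.Dict String (String × List String)) (k : String) :
    (pvMap d).contains k = d.contains k := by
  simp only [pvMap, PySem.Dict.contains, List.any_map]
  rfl

theorem pvMap_keys (d : PySem.Dict String (String × List String)) :
    (pvMap d).keys = d.keys := by
  simp [pvMap, PySem.Dict.keys, List.map_map, Function.comp, pvF]

theorem pvMap_get? (d : PySem.Dict String (String × List String)) (k : String) :
    (pvMap d).get? k = (d.get? k).map (fun v => pvExt v.1 v.2) := by
  simp only [pvMap, PySem.Dict.get?, List.find?_map]
  have hp : ((fun p : String × String × String × Int × String × Int => p.1 == k) ∘ pvF)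
      = (fun p : String × String × List String => p.1 == k) := rfl
  rw [hp]
  cases List.find? (fun p : String × String × List String => p.1 == k) d.items <;>
    simp [pvF]

theorem pvMap_insert (d : PySem.Dict String (String × List String)) (k p : String)
    (L : List String) :
    pvMap (d.insert k (p, L)) = (pvMap d).insert k (pvExt p L) := by
  apply PySem.Dict.ext
  simp only [pvMap, PySem.Dict.insert]
  have : (PySem.Dict.mk (d.items.map pvF)).contains k = d.contains k := pvMap_contains d k
  rw [this]
  by_cases hc : d.contains k = true
  · simp only [hc, if_true, List.map_map]
    apply List.map_congr_left
    intro it _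
    by_cases hik : it.1 == k
    · simp [Function.comp, hik, pvF]
    · simp [Function.comp, hik, pvF]
  · simp [hc, pvF]

theorem pvInsert_get?_self {ν : Type} (d : PySem.Dict String ν) (k : String) (v : ν)
    (hnd : d.keys.Nodup) (hg : d.get? k = some v) : d.insert k v = d := by
  have hc : d.contains k = true := by
    rw [PySem.Dict.contains_eq_isSome_get?, hg]; rfl
  apply PySem.Dict.ext
  simp only [PySem.Dict.insert, hc, if_true]
  conv_rhs => rw [← List.map_id d.items]
  apply List.map_congr_left
  intro it hit
  obtain ⟨i1, i2⟩ := it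
  by_cases hik : i1 = k
  · subst hik
    have := PySem.Dict.get?_of_mem_items d hit hnd
    rw [hg] at this
    have hv : i2 = v := by injection this.symm
    subst hv
    simp
  · simp [hik]

theorem pvFoldRel (slots : List (String × String × String)) :
    ∀ d : PySem.Dict String (String × List String), pvGood d →
      (slots.foldl (fun d s =>
          let r := pvRankB s.1
          match d.get? s.2.1 with
          | none => d.insert s.2.1 (s.2.2, s.1, r, s.1, r)
          | some e =>
              let e1 := if r < e.2.2.1 then (e.1, s.1, r, e.2.2.2) else e
              let e2 := if e1.2.2.2.2 < r then (e1.1, e1.2.1, e1.2.2.1, s.1, r) else e1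
              d.insert s.2.1 e2) (pvMap d)
        = pvMap (slots.foldl (fun d s =>
          let d1 := if d.contains s.2.1 then d else d.insert s.2.1 (s.2.2, ([] : List String))
          let pr := d1.getD s.2.1 ("", [])
          if s.1 ∈ pr.2 then d1 else d1.insert s.2.1 (pr.1, pr.2 ++ [s.1])) d))
      ∧ pvGood (slots.foldl (fun d s =>
          let d1 := if d.contains s.2.1 then d else d.insert s.2.1 (s.2.2, ([] : List String))
          let pr := d1.getD s.2.1 ("", [])
          if s.1 ∈ pr.2 then d1 else d1.insert s.2.1 (pr.1, pr.2 ++ [s.1])) d) := by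
  induction slots with
  | nil => intro d hd; exact ⟨rfl, hd⟩
  | cons s slots ih =>
    intro d hd
    have hstep :
        (let r := pvRankB s.1
         match (pvMap d).get? s.2.1 with
         | none => (pvMap d).insert s.2.1 (s.2.2, s.1, r, s.1, r)
         | some e =>
             let e1 := if r < e.2.2.1 then (e.1, s.1, r, e.2.2.2) else e
             let e2 := if e1.2.2.2.2 < r then (e1.1, e1.2.1, e1.2.2.1, s.1, r) else e1
             (pvMap d).insert s.2.1 e2)
        = pvMap (let d1 := if d.contains s.2.1 then d else d.insert s.2.1 (s.2.2, ([] : List String))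
                 let pr := d1.getD s.2.1 ("", [])
                 if s.1 ∈ pr.2 then d1 else d1.insert s.2.1 (pr.1, pr.2 ++ [s.1]))
        ∧ pvGood (let d1 := if d.contains s.2.1 then d else d.insert s.2.1 (s.2.2, ([] : List String))
                  let pr := d1.getD s.2.1 ("", [])
                  if s.1 ∈ pr.2 then d1 else d1.insert s.2.1 (pr.1, pr.2 ++ [s.1])) := by
      cases hg : d.get? s.2.1 with
      | none =>
        have hc : d.contains s.2.1 = false := by
          rw [PySem.Dict.contains_eq_isSome_get?, hg]; rfl
        constructor
        · rw [pvMap_get?, hg]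
          simp only [Option.map_none, hc, Bool.false_eq_true, if_false,
            PySem.Dict.getD_insert_self, List.not_mem_nil]
          rw [PySem.Dict.insert_insert_self, pvMap_insert]
          rfl
        · simp only [hc, Bool.false_eq_true, if_false, PySem.Dict.getD_insert_self]
          rw [if_neg (List.not_mem_nil)]
          rw [PySem.Dict.insert_insert_self]
          refine ⟨PySem.Dict.nodup_keys_insert _ _ _ hd.1, ?_⟩
          intro it hit
          rcases (PySem.Dict.mem_items_insert _ _ _ _).mp hit with h1 | ⟨h2, _⟩
          · subst h1; simp
          · exact hd.2 it h2
      | some pL =>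
        have hc : d.contains s.2.1 = true := by
          rw [PySem.Dict.contains_eq_isSome_get?, hg]; rfl
        have hmemit : (s.2.1, pL) ∈ d.items := PySem.Dict.mem_items_of_get?_eq_some d hg
        have hnil : pL.2 ≠ [] := hd.2 _ hmemit
        have hgetD : d.getD s.2.1 ("", []) = pL := PySem.Dict.getD_of_get?_eq_some d _ hg
        obtain ⟨c1, c2, c3, c4, c5, c6, c7⟩ := pvPack pL.1 pL.2 hnil
        by_cases hm : s.1 ∈ pL.2
        · constructor
          · rw [pvMap_get?, hg]
            simp only [Option.map_some, hc, if_true, hgetD, if_pos hm]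
            have hE : (let r := pvRankB s.1
                let e1 := if r < (pvExt pL.1 pL.2).2.2.1 then
                    ((pvExt pL.1 pL.2).1, s.1, r, (pvExt pL.1 pL.2).2.2.2) else pvExt pL.1 pL.2
                let e2 := if e1.2.2.2.2 < r then (e1.1, e1.2.1, e1.2.2.1, s.1, r) else e1
                e2) = pvExt pL.1 pL.2 := by
              have hb := c5 s.1 hm
              have h1 : ¬ pvRankB s.1 < (pvExt pL.1 pL.2).2.2.1 := by omega
              have h2 : ¬ (pvExt pL.1 pL.2).2.2.2.2 < pvRankB s.1 := by omega
              simp only [if_neg h1, if_neg h2]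
            simp only [] at hE ⊢
            rw [hE]
            exact pvInsert_get?_self _ _ _ (by rw [pvMap_keys]; exact hd.1)
              (by rw [pvMap_get?, hg]; rfl)
          · simp only [hc, if_true, hgetD, if_pos hm]
            exact hd
        · constructor
          · rw [pvMap_get?, hg]
            simp only [Option.map_some, hc, if_true, hgetD, if_neg hm]
            have hE : (let r := pvRankB s.1
                let e1 := if r < (pvExt pL.1 pL.2).2.2.1 then
                    ((pvExt pL.1 pL.2).1, s.1, r, (pvExt pL.1 pL.2).2.2.2) else pvExt pL.1 pL.2
                let e2 := if e1.2.2.2.2 < r then (e1.1, e1.2.1, e1.2.2.1, s.1, r) else e1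
                e2) = pvExt pL.1 (pL.2 ++ [s.1]) := by
              rw [pvExt_append pL.1 s.1 pL.2 hnil]
              rfl
            simp only [] at hE ⊢
            rw [hE, ← pvMap_insert]
          · simp only [hc, if_true, hgetD, if_neg hm]
            refine ⟨PySem.Dict.nodup_keys_insert _ _ _ hd.1, ?_⟩
            intro it hit
            rcases (PySem.Dict.mem_items_insert _ _ _ _).mp hit with h1 | ⟨h2, _⟩
            · subst h1; simp
            · exact hd.2 it h2
    simp only [List.foldl_cons]
    obtain ⟨hs1, hs2⟩ := hstep
    rw [hs1]
    exact ih _ hs2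


-- ---- per-day equality and the main theorem ----

theorem pvGetD_zero_headD (xs : List String) : PySem.List.pyGetD xs 0 "" = xs.headD "" := by
  rw [PySem.List.pyGetD_zero]
  cases xs <;> simp

theorem pvGetD_neg_one_getLastD (xs : List String) :
    PySem.List.pyGetD xs (-1) "" = xs.getLastD "" := by
  simp [PySem.List.pyGetD, PySem.List.pyGet?_neg_one, List.getLastD_eq_getLast?]

theorem pvDay_eq (slots : List (String × String × String)) : pvDayA slots = pvDayB slots := by
  unfold pvDayA pvDayB
  obtain ⟨hB, hGood⟩ := pvFoldRel slots PySem.Dict.empty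
    ⟨PySem.Dict.nodup_keys_empty, by simp [PySem.Dict.empty]⟩
  have hme : pvMap PySem.Dict.empty = PySem.Dict.empty := rfl
  rw [hme] at hB
  simp only [] at hB ⊢
  rw [hB]
  congr 1
  rw [PySem.List.foldl_append_singleton_eq_map (f := fun it : String × String × List String =>
      let aulas := PySem.List.sorted it.2.2 pvRankA false
      let inicio := (pvHorarios.getD (PySem.List.pyGetD aulas 0 "") ("", "")).1
      let fim := (pvHorarios.getD (PySem.List.pyGetD aulas (-1) "") ("", "")).2
      [("materia", it.1), ("prof", it.2.1), ("inicio", inicio), ("fim", fim)])]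
  simp only [List.nil_append, pvMap, List.map_map]
  apply List.map_congr_left
  intro it hit
  have hL : it.2.2 ≠ [] := hGood.2 it hit
  obtain ⟨c1, c2, c3, c4, c5, c6, c7⟩ := pvPack it.2.1 it.2.2 hL
  have hfun : pvRankA = pvRankB := funext pvRank_eq
  simp only [Function.comp, pvF, hfun, pvGetD_zero_headD, pvGetD_neg_one_getLastD, c6]
  have hfim : (pvHorarios.getD ((PySem.List.sorted it.2.2 pvRankB false).getLastD "") ("", "")).2
      = (pvHorarios.getD (pvExt it.2.1 it.2.2).2.2.2.1 ("", "")).2 :=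
    pvHorSnd_eq_of_rank_eq (c7.trans c3)
  rw [hfim, c1]

-- ===== VERDICT =====
theorem agrupar_grade_py_spec : Claim_equal_agrupar_grade_py := by
  intro g _
  unfold Spec_agrupar_grade_py agrupar_grade_py agrupar_grade_py_alt
  congr 1
  apply PySem.List.foldl_congr_mem
  intro acc p _
  by_cases hp : p.2 = []
  · rw [if_pos hp, hp]
    rfl
  · rw [if_neg hp, pvDay_eq]
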